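-- pv_equiv track=rewrite | github.com/mchu-1/RPT | RADAR.py | find_editing_sites
-- ===== SOURCE A (Python) =====
-- def is_editing_site(anticodon: str) -> bool:
--     """
--     Determine if an anticodon is a possible ADAR editing site.
--     """
--     edit_sites = ["CCA", "GCA", "TCA"] # base-pairing sites for UAG sensor stop codons with roughly equivalent ADAR editing efficiency (https://doi.org/10.1038/s41587-019-0178-z)
--     if anticodon in edit_sites:
--         return True
--     else:
--         return False
--
-- def find_editing_sites(frame: str) -> list[int]:
--     """
--     Find starting positions of all possible ADAR editing sites in a reading frame.
--     """
--     edit_positions = []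
--     for i in range(0, len(frame)-2):
--         if is_editing_site(frame[i:i+3]):
--             edit_positions.append(i) # starting position of edit site
--         else:
--             continue
--
--     return edit_positions
-- ===== SOURCE B (Python) =====
-- def find_editing_sites(frame: str) -> list[int]:
--     """Non-overlapping scanner: check the three characters directly and jump
--     past a whole match (the pattern [CGT]CA cannot overlap itself)."""
--     positions = []
--     i = 0
--     n = len(frame)
--     while i + 2 < n:
--         if frame[i] in "CGT" and frame[i + 1] == "C" and frame[i + 2] == "A":
--             positions.append(i)
--             i += 3
--         else:
--             i += 1
--     return positions
-- ===== Notes on version B (the rewrite author's own statement) =====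
-- stated objective: alternative
-- what changed: Replaces the slice-every-position loop with a helper membership test by a single character-wise scanner that compares the three characters in place and skips 3 positions past each match (valid because [CGT]CA cannot overlap itself), building no temporary substrings.
import Mathlib
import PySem

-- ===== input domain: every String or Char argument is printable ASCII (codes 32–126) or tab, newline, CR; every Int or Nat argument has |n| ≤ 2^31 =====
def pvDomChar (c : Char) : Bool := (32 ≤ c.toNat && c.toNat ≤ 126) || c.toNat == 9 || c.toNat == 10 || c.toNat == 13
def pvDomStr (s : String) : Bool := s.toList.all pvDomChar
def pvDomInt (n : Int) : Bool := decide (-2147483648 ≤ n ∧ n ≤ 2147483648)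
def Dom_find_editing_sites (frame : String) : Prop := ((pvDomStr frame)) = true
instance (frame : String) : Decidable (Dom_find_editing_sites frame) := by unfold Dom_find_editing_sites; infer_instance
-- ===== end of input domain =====

-- B replaces A's slice-per-position loop with a helper membership test by a character-wise
-- scanner that skips past each (non-overlappable) match; alternative decomposition, same cost.


-- ===== PORT A =====
def is_editing_site (anticodon : String) : Bool :=
  if anticodon ∈ ["CCA", "GCA", "TCA"] then true else false

def find_editing_sites (frame : String) : List Int :=
  (PySem.List.pyRange 0 ((PySem.Str.len frame : Int) - 2) 1).foldl
    (fun acc i =>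
      if is_editing_site (PySem.Str.slice frame (some i) (some (i + 3))) then acc ++ [i]
      else acc) []

-- ===== PORT B =====
-- the while loop of Source B: look at the three chars in place; after a match jump 3, else 1
def fes_scan : List Char → Int → List Int
  | c1 :: c2 :: c3 :: rest, i =>
      if ['C', 'G', 'T'].contains c1 && c2 == 'C' && c3 == 'A' then
        i :: fes_scan rest (i + 3)
      else
        fes_scan (c2 :: c3 :: rest) (i + 1)
  | _, _ => []

def find_editing_sites_alt (frame : String) : List Int :=
  fes_scan frame.toList 0

-- ===== PRECONDITION & SPEC =====
def Spec_find_editing_sites (frame : String) (out : List Int) : Prop := out = find_editing_sites_alt frame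
instance (frame : String) (out : List Int) : Decidable (Spec_find_editing_sites frame out) := by unfold Spec_find_editing_sites; infer_instance

-- ===== CLAIM (what is proved, stated in full; the proofs are below) =====
def Claim_equal_find_editing_sites : Prop := ∀ (frame : String), Dom_find_editing_sites frame → Spec_find_editing_sites frame (find_editing_sites frame)

-- ===== LEMMAS AND PROOFS =====

-- reference scan: step 1 at every position (the order A visits positions in)
def fes_naive : List Char → Int → List Int
  | c1 :: c2 :: c3 :: rest, i =>
      (if ['C', 'G', 'T'].contains c1 && c2 == 'C' && c3 == 'A' then [i] else []) ++
        fes_naive (c2 :: c3 :: rest) (i + 1)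
  | _, _ => []

-- after a match the next two positions cannot match ([CGT]CA does not overlap itself)
lemma fes_naive_after_match (rest : List Char) (i : Int) :
    fes_naive ('C' :: 'A' :: rest) i = fes_naive rest (i + 2) := by
  match rest with
  | [] => simp [fes_naive]
  | [r0] => simp [fes_naive]
  | r0 :: r1 :: rr => simp [fes_naive]; ring_nf

lemma fes_scan_eq_naive (l : List Char) (i : Int) : fes_scan l i = fes_naive l i := by
  fun_induction fes_scan l i with
  | case1 c1 c2 c3 rest i h ih =>
      have h' := h
      simp only [Bool.and_eq_true, beq_iff_eq] at h'
      obtain ⟨⟨-, hc2⟩, hc3⟩ := h'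
      subst hc2; subst hc3
      simp only [fes_naive, h, if_true, ih, fes_naive_after_match]
      have h3 : i + 1 + 2 = i + 3 := by ring
      rw [h3]; rfl
  | case2 c1 c2 c3 rest i h ih =>
      simp only [fes_naive, ih]
      rw [if_neg (by simpa using h)]
      simp
  | case3 l i hne =>
      match l with
      | [] => rfl
      | [_] => rfl
      | [_, _] => rfl
      | a :: b :: c :: r => exact absurd rfl (hne a b c r)

-- A's per-position test, computed on the three characters at that position
lemma is_editing_site_triple (c1 c2 c3 : Char) (s : String)
    (h : s.toList = [c1, c2, c3]) :
    is_editing_site s = (['C', 'G', 'T'].contains c1 && c2 == 'C' && c3 == 'A') := by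
  simp only [is_editing_site, List.mem_cons, List.not_mem_nil, or_false,
    ← String.toList_inj, h]
  have hC : "CCA".toList = ['C','C','A'] := by decide
  have hG : "GCA".toList = ['G','C','A'] := by decide
  have hT : "TCA".toList = ['T','C','A'] := by decide
  rw [hC, hG, hT]
  simp only [List.cons.injEq, and_true, List.contains_cons, List.contains_nil, Bool.or_false]
  by_cases h1 : c2 = 'C' <;> by_cases h2 : c3 = 'A' <;>
    simp [h1, h2] <;> by_cases hc : c1 = 'C' <;> by_cases hg : c1 = 'G' <;> by_cases ht : c1 = 'T' <;>
    simp [hc, hg, ht]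

lemma fes_naive_short (l : List Char) (i : Int) (h : l.length < 3) : fes_naive l i = [] := by
  match l with
  | [] => rfl
  | [_] => rfl
  | [_, _] => rfl
  | _ :: _ :: _ :: _ => exact absurd h (by simp)

lemma find_eq_naive_aux (fl : List Char) (m : Nat) : ∀ j : Nat, fl.length - j ≤ m →
    ((PySem.List.pyRange (j : Int) ((fl.length : Int) - 2) 1).filter
        (fun i => is_editing_site (PySem.Str.slice (String.ofList fl) (some i) (some (i + 3))))) =
      fes_naive (fl.drop j) (j : Int) := by
  induction m with
  | zero =>
      intro j hj
      rw [PySem.List.pyRange_one_eq_nil (by omega), List.filter_nil,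
        fes_naive_short _ _ (by simp; omega)]
  | succ m ih =>
      intro j hj
      by_cases hend : (fl.length : Int) - 2 ≤ (j : Int)
      · rw [PySem.List.pyRange_one_eq_nil hend, List.filter_nil,
          fes_naive_short _ _ (by simp; omega)]
      · have hj3 : j + 3 ≤ fl.length := by omega
        have h1 : j < fl.length := by omega
        have h2 : j + 1 < fl.length := by omega
        have h3 : j + 2 < fl.length := by omega
        rw [PySem.List.pyRange_one_cons (by omega), List.filter_cons]
        have hdrop : fl.drop j = fl[j] :: fl[j+1] :: fl[j+2] :: fl.drop (j+3) := by
          rw [List.drop_eq_getElem_cons h1, List.drop_eq_getElem_cons h2,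
            List.drop_eq_getElem_cons h3]
        have hslice : (PySem.Str.slice (String.ofList fl) (some (j : Int))
            (some ((j : Int) + 3))).toList = [fl[j], fl[j+1], fl[j+2]] := by
          have hs := PySem.List.slice_natCast_add fl j 3
          push_cast at hs
          simp only [PySem.Str.toList_slice, PySem.Chars.slice_eq_listSlice,
            String.toList_ofList, hs, hdrop]
          rfl
        have htest := is_editing_site_triple fl[j] fl[j+1] fl[j+2] _ hslice
        have ihj := ih (j + 1) (by omega)
        rw [hdrop]
        simp only [fes_naive, htest]
        have hd1 : fl.drop (j+1) = fl[j+1] :: fl[j+2] :: fl.drop (j+3) := by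
          rw [List.drop_eq_getElem_cons h2, List.drop_eq_getElem_cons h3]
        rw [hd1] at ihj
        have hcast : ((j : Int) + 1) = ((j + 1 : Nat) : Int) := by push_cast; ring
        rw [hcast, ihj]
        by_cases ht : (['C', 'G', 'T'].contains fl[j] && fl[j+1] == 'C' && fl[j+2] == 'A') = true
        · rw [if_pos ht, if_pos ht]; rfl
        · rw [if_neg ht, if_neg ht]; rfl

theorem find_editing_sites_eq (frame : String) :
    find_editing_sites frame = find_editing_sites_alt frame := by
  unfold find_editing_sites find_editing_sites_alt
  rw [PySem.List.foldl_append_if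
    (p := fun i => is_editing_site (PySem.Str.slice frame (some i) (some (i + 3))))
    (f := fun i => i)]
  rw [List.map_id', List.nil_append, fes_scan_eq_naive]
  have h0 : ((0 : Nat) : Int) = (0 : Int) := rfl
  have := find_eq_naive_aux frame.toList frame.toList.length 0 (by omega)
  simp only [String.ofList_toList, List.drop_zero, h0] at this
  simpa using this

-- ===== VERDICT (by name: the statement is the Claim_ definition above) =====
theorem find_editing_sites_spec : Claim_equal_find_editing_sites := by
  intro frame _
  unfold Spec_find_editing_sites
  exact find_editing_sites_eq frame
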